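-- pv_equiv track=rewrite | github.com/anipatil72/My_Competitive_Programming | B_Plus_and_Multiply.py | is_in_set
-- ===== SOURCE A (Python) =====
-- def is_in_set(n, a, b):
--     if n == 1:
--         return True
--     if a == 1:
--         return (n - 1) % b == 0
--     x = 1
--     while x <= n:
--         if x == n:
--             return True
--         if (n - x) % a == 0:
--             return True
--         x *= a
--         x += b
--     return False
-- ===== SOURCE B (Python) =====
-- def is_in_set(n, a, b):
--     if n == 1:
--         return True
--     if a == 1:
--         return (n - 1) % b == 0
--     if n < 1:
--         return False
--     return (n - 1) % a == 0 or (a + b <= n and (n - b) % a == 0)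
-- ===== Notes on version B (the rewrite author's own statement) =====
-- stated objective: simpler
-- what changed: The geometric while-loop over x -> x*a+b is replaced by a single closed-form arithmetic test: every iterate after the first is congruent to b (mod a) and the sequence is increasing on the natural domain, so membership reduces to (n-1)%a==0 or (a+b<=n and (n-b)%a==0); Pre_ keeps the natural domain (a>=2 with b>=0, plus the trivially-decided cases n=1, n<1, a=1 with b!=0, a=-1) and excludes inputs where A raises ZeroDivisionError (a=0 or a=1,b=0 with n>=2) or where A's loop can fail to terminate (a<=-2, or a>=2 with b<0); on the excluded inputs where A does return, it happens to agree with B.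
-- outside the precondition, e.g. on is_in_set(10, -3, 2): A returns True, B returns True; on is_in_set(10, 2, -3): A does not finish within the time limit, B returns False; on is_in_set(2, -2, 3): A does not finish within the time limit, B returns False
import Mathlib
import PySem

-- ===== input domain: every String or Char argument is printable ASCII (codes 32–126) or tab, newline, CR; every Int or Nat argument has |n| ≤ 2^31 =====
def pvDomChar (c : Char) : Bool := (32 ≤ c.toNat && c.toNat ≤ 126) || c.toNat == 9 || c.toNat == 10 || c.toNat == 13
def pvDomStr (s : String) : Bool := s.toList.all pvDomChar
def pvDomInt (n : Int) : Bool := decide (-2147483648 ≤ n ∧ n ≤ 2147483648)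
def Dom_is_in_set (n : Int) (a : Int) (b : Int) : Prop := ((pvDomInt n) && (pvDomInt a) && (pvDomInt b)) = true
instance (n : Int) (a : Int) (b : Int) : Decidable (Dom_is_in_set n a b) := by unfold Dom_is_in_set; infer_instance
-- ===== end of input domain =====

-- B replaces A's geometric while-loop by a single closed-form divisibility test (simpler; no loop).

-- ===== PORT A =====
-- the while loop, fuel-bounded for totality only: within Pre_ ∧ Dom the loop exits
-- (or returns) well before 100 iterations, since x at least doubles each step
def isInSetLoop (n a b : Int) : Nat → Int → Bool
  | 0, _ => false
  | fuel+1, x =>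
    if x ≤ n then
      if x = n then true
      else if PySem.Int.mod (n - x) a = 0 then true
      else isInSetLoop n a b fuel (x * a + b)
    else false

def is_in_set (n : Int) (a : Int) (b : Int) : Bool :=
  if n = 1 then true
  else if a = 1 then decide (PySem.Int.mod (n - 1) b = 0)
  else isInSetLoop n a b 100 1

-- ===== PORT B =====
def is_in_set_alt (n : Int) (a : Int) (b : Int) : Bool :=
  if n = 1 then true
  else if a = 1 then decide (PySem.Int.mod (n - 1) b = 0)
  else if n < 1 then false
  else decide (PySem.Int.mod (n - 1) a = 0) ||
       (decide (a + b ≤ n) && decide (PySem.Int.mod (n - b) a = 0))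

-- ===== PRECONDITION & SPEC =====
-- Pre_ keeps the natural domain: a ≥ 2 with b ≥ 0, plus the cases decided before/without
-- the loop (n = 1; n < 1; a = 1 with b ≠ 0; a = -1, where the first modulus check fires).
-- It excludes inputs where A raises ZeroDivisionError (a = 0, or a = 1 with b = 0, for n ≥ 2)
-- and inputs where A's loop can fail to terminate (a ≤ -2, or a ≥ 2 with b < 0, for n ≥ 2).
def Pre_is_in_set (n : Int) (a : Int) (b : Int) : Prop :=
  n = 1 ∨ (a = 1 ∧ b ≠ 0) ∨ a = -1 ∨ (n < 1 ∧ a ≠ 1) ∨ (2 ≤ a ∧ 0 ≤ b)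
instance (n : Int) (a : Int) (b : Int) : Decidable (Pre_is_in_set n a b) := by
  unfold Pre_is_in_set; infer_instance

def pvWitness_is_in_set : Int × Int × Int := (10, 3, 4)

def Spec_is_in_set (n : Int) (a : Int) (b : Int) (out : Bool) : Prop := out = is_in_set_alt n a b
instance (n : Int) (a : Int) (b : Int) (out : Bool) : Decidable (Spec_is_in_set n a b out) := by
  unfold Spec_is_in_set; infer_instance

-- ===== CLAIM (what is proved, stated in full; the proofs are below) =====
def Claim_equal_is_in_set : Prop := ∀ (n : Int) (a : Int) (b : Int), Dom_is_in_set n a b → Pre_is_in_set n a b → Spec_is_in_set n a b (is_in_set n a b)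

-- ===== LEMMAS AND PROOFS =====

-- if x ≡ b (mod a) but n ≢ b (mod a), no check ever fires and x at least doubles,
-- so enough fuel drives x past n and the loop returns false
theorem isInSetLoop_false (n a b : Int) (fuel : Nat) :
    ∀ x : Int, 2 ≤ a → 0 ≤ b → 0 < x → a ∣ (x - b) → ¬ a ∣ (n - b) →
      n < 2 ^ fuel * x → isInSetLoop n a b fuel x = false := by
  induction fuel with
  | zero =>
      intro x _ _ _ _ _ _
      simp [isInSetLoop]
  | succ f ih =>
      intro x ha hb hx hdx hnd hlt
      by_cases hle : x ≤ n
      · have hxn : x ≠ n := by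
          rintro rfl; exact hnd hdx
        have hmod : ¬ PySem.Int.mod (n - x) a = 0 := by
          rw [PySem.Int.mod_eq_zero_iff_dvd]
          intro hnx
          exact hnd (by have := Int.dvd_add hnx hdx; simpa [sub_add_sub_cancel] using this)
        have h2x : 2 * x ≤ x * a + b := by nlinarith
        have hrec : isInSetLoop n a b f (x * a + b) = false := by
          apply ih (x * a + b) ha hb (by nlinarith) ⟨x, by ring⟩ hnd
          have h1 : (2:Int) ^ (f+1) * x = 2 ^ f * (2 * x) := by ring
          have h2 : (2:Int) ^ f * (2 * x) ≤ 2 ^ f * (x * a + b) :=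
            mul_le_mul_of_nonneg_left h2x (by positivity)
          calc n < 2 ^ (f+1) * x := hlt
            _ = 2 ^ f * (2 * x) := h1
            _ ≤ 2 ^ f * (x * a + b) := h2
        simp [isInSetLoop, hle, hxn, hmod, hrec]
      · simp [isInSetLoop, hle]

-- for a ≥ 2, b ≥ 0, 2 ≤ n < 2^100 the loop equals B's closed-form test
theorem isInSetLoop_eq (n a b : Int) (hn : 2 ≤ n) (ha : 2 ≤ a) (hb : 0 ≤ b)
    (hbig : n < 2 ^ 100) :
    isInSetLoop n a b 100 1 =
      (decide (PySem.Int.mod (n - 1) a = 0) ||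
       (decide (a + b ≤ n) && decide (PySem.Int.mod (n - b) a = 0))) := by
  have h1n : (1:Int) ≤ n := by omega
  have h1ne : (1:Int) ≠ n := by omega
  show (if (1:Int) ≤ n then
          if (1:Int) = n then true
          else if PySem.Int.mod (n - 1) a = 0 then true
          else isInSetLoop n a b 99 (1 * a + b)
        else false) = _
  rw [if_pos h1n, if_neg h1ne]
  by_cases h1 : PySem.Int.mod (n - 1) a = 0
  · simp [h1]
  · rw [if_neg h1]
    have hx1 : (1:Int) * a + b = a + b := by ring
    rw [hx1]
    by_cases h2 : a + b ≤ n
    · by_cases h3 : PySem.Int.mod (n - b) a = 0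
      · -- the check fires at x = a + b
        have hd : a ∣ (n - (a + b)) := by
          rw [PySem.Int.mod_eq_zero_iff_dvd] at h3
          obtain ⟨k, hk⟩ := h3
          exact ⟨k - 1, by linarith [hk]⟩
        have hmod : PySem.Int.mod (n - (a + b)) a = 0 :=
          (PySem.Int.mod_eq_zero_iff_dvd _ _).mpr hd
        by_cases he : a + b = n
        · simp [isInSetLoop, he, h1, h3]
        · simp [isInSetLoop, h2, he, hmod, h1, h3]
      · -- no later check can fire; the loop runs x past n and returns false
        have hnd : ¬ a ∣ (n - b) := by
          rw [PySem.Int.mod_eq_zero_iff_dvd] at h3; exact h3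
        have hrec : isInSetLoop n a b 99 (a + b) = false := by
          apply isInSetLoop_false n a b 99 (a + b) ha hb (by omega) ⟨1, by ring⟩ hnd
          have h2ab : (2:Int) ≤ a + b := by omega
          have : (2:Int) ^ 99 * 2 ≤ 2 ^ 99 * (a + b) :=
            mul_le_mul_of_nonneg_left h2ab (by positivity)
          calc n < 2 ^ 100 := hbig
            _ = 2 ^ 99 * 2 := by ring
            _ ≤ 2 ^ 99 * (a + b) := this
        simp [hrec, h1, h2, h3]
    · -- a + b > n : the loop exits immediately at x = a + b
      have : isInSetLoop n a b 99 (a + b) = false := by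
        simp [isInSetLoop, h2]
      simp [this, h1, h2]

-- ===== VERDICT (by name: the statement is the Claim_ definition above) =====
theorem is_in_set_spec : Claim_equal_is_in_set := by
  intro n a b hdom hpre
  unfold Spec_is_in_set
  by_cases hn1 : n = 1
  · simp [is_in_set, is_in_set_alt, hn1]
  · by_cases ha1 : a = 1
    · simp [is_in_set, is_in_set_alt, hn1, ha1]
    · by_cases hnlt : n < 1
      · have hloop : isInSetLoop n a b 100 1 = false := by
          simp [isInSetLoop, show ¬ (1:Int) ≤ n by omega]
        simp [is_in_set, is_in_set_alt, hn1, ha1, hnlt, hloop]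
      · -- n ≥ 2 here, so Pre_ leaves a = -1 or (2 ≤ a ∧ 0 ≤ b)
        have hn2 : 2 ≤ n := by omega
        rcases hpre with h | h | h | h | h
        · omega
        · exact absurd h.1 ha1
        · -- a = -1: the very first modulus check fires in both programs
          subst h
          have hmod : PySem.Int.mod (n - 1) (-1) = 0 :=
            (PySem.Int.mod_eq_zero_iff_dvd _ _).mpr ⟨-(n - 1), by ring⟩
          have hloop : isInSetLoop n (-1) b 100 1 = true := by
            simp [isInSetLoop, show (1:Int) ≤ n by omega, show (1:Int) ≠ n by omega, hmod]
          simp [is_in_set, is_in_set_alt, hn1, hnlt, hloop, hmod]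
        · omega
        · have hdomn : n < 2 ^ 100 := by
            have : n ≤ 2147483648 := by
              unfold Dom_is_in_set pvDomInt at hdom
              simp only [Bool.and_eq_true, decide_eq_true_eq] at hdom
              exact hdom.1.1.2
            calc n ≤ 2147483648 := this
              _ < 2 ^ 100 := by norm_num
          have := isInSetLoop_eq n a b hn2 h.1 h.2 hdomn
          simp [is_in_set, is_in_set_alt, hn1, ha1, hnlt, this]
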